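-- pv_equiv track=rewrite | github.com/jamestcole/AOCsummer25 | day8solutionpt1.py | get_visible_count
-- ===== SOURCE A (Python) =====
-- def get_visible_count(grid):
--     rows = len(grid)
--     cols = len(grid[0])
--
--     def is_visible(r, c):
--         val = grid[r][c]
--
--         up    = all(grid[i][c] < val for i in range(0, r))
--         down  = all(grid[i][c] < val for i in range(r+1, rows))
--         left  = all(grid[r][j] < val for j in range(0, c))
--         right = all(grid[r][j] < val for j in range(c+1, cols))
--
--         return up or down or left or right
--
--     count = 0
--     for r in range(rows):
--         for c in range(cols):
--             # Edge cells are always visible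
--             if r == 0 or r == rows - 1 or c == 0 or c == cols - 1:
--                 count += 1
--             else:
--                 if is_visible(r, c):
--                     count += 1
--
--     return count
-- ===== SOURCE B (Python) =====
-- def get_visible_count(grid):
--     rows = len(grid)
--     cols = len(grid[0])
--     grid = [row[:cols] for row in grid]
--
--     def row_prefix(xs):
--         m = None
--         out = []
--         for x in xs:
--             out.append(m)
--             m = x if m is None else max(m, x)
--         return out
--
--     def col_prefix(g):
--         m = [None] * cols
--         out = []
--         for row in g:
--             out.append(m)
--             m = [x if p is None else max(p, x) for p, x in zip(m, row)]
--         return out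
--
--     L = [row_prefix(row) for row in grid]
--     R = [row_prefix(row[::-1])[::-1] for row in grid]
--     U = col_prefix(grid)
--     D = col_prefix(grid[::-1])[::-1]
--
--     def ok(m, v):
--         return m is None or m < v
--
--     count = 0
--     for r in range(rows):
--         for c in range(cols):
--             v = grid[r][c]
--             if ok(L[r][c], v) or ok(R[r][c], v) or ok(U[r][c], v) or ok(D[r][c], v):
--                 count += 1
--     return count
-- ===== Notes on version B (the rewrite author's own statement) =====
-- stated objective: faster
-- what changed: Replaced A's per-cell rescans of the whole row and column in each of the four directions by four precomputed directional running-maxima tables (prefix maxima per row, reversed row, column and reversed column) over the width-normalized grid, so each cell's visibility is an O(1) comparison against four table entries.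
-- outside the precondition, e.g. on get_visible_count([[1, 2], [3]]): A returns 4, B raises IndexError
import Mathlib
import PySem

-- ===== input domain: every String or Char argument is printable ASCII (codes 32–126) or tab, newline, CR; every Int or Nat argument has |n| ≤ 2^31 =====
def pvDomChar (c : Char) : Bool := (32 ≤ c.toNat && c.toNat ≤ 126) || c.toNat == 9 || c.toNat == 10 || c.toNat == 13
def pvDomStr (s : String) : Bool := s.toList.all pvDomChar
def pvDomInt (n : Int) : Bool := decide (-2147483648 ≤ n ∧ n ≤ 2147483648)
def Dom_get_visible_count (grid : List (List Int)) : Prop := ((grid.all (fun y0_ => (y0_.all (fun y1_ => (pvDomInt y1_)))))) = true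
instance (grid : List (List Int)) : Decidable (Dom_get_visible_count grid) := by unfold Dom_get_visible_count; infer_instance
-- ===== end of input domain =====

-- B replaces A's per-cell directional rescans by four precomputed running-maxima tables
-- (prefix maxima per row, per reversed row, per column, per reversed column), making each
-- visibility test O(1): O(R*C) total instead of A's O(R*C*(R+C)). Objective: faster.

-- ===== PORT A =====
-- grid[i][j] (indices are in range under Pre_; pyGetD is Python-exact incl. negative indices)
def pvGet2 (grid : List (List Int)) (i j : Int) : Int :=
  PySem.List.pyGetD (PySem.List.pyGetD grid i []) j 0

def pvIsVisible (grid : List (List Int)) (rows cols r c : Int) : Bool :=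
  let val := pvGet2 grid r c
  let up := (PySem.List.pyRange 0 r).all (fun i => decide (pvGet2 grid i c < val))
  let down := (PySem.List.pyRange (r + 1) rows).all (fun i => decide (pvGet2 grid i c < val))
  let left := (PySem.List.pyRange 0 c).all (fun j => decide (pvGet2 grid r j < val))
  let right := (PySem.List.pyRange (c + 1) cols).all (fun j => decide (pvGet2 grid r j < val))
  up || down || left || right

def get_visible_count (grid : List (List Int)) : Int :=
  let rows : Int := grid.length
  let cols : Int := (PySem.List.pyGetD grid 0 []).length
  (PySem.List.pyRange 0 rows).foldl (fun count r =>
    (PySem.List.pyRange 0 cols).foldl (fun count c =>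
      if r == 0 || r == rows - 1 || c == 0 || c == cols - 1 then count + 1
      else if pvIsVisible grid rows cols r c then count + 1 else count) count) 0

-- ===== PORT B =====
-- m = x if m is None else max(m, x)
def pvStep (m : Option Int) (x : Int) : Option Int :=
  match m with
  | none => some x
  | some p => some (max p x)

-- row_prefix: prefix maxima (None before the first element)
def pvRowPrefix (m : Option Int) : List Int → List (Option Int)
  | [] => []
  | x :: t => m :: pvRowPrefix (pvStep m x) t

-- col_prefix: the same, pointwise over a running list of column maxima
def pvColPrefix (m : List (Option Int)) : List (List Int) → List (List (Option Int))
  | [] => []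
  | row :: t => m :: pvColPrefix (List.zipWith pvStep m row) t

def pvOk (m : Option Int) (v : Int) : Bool :=
  match m with
  | none => true
  | some p => decide (p < v)

-- xs[::-1]
def pvRev {α : Type} (xs : List α) : List α :=
  (PySem.List.slice? xs none none (-1)).getD []

def get_visible_count_alt (grid : List (List Int)) : Int :=
  let rows : Int := grid.length
  let cols : Nat := (PySem.List.pyGetD grid 0 []).length
  let grid2 := grid.map (fun row => PySem.List.slice row none (some (cols : Int)))
  let L := grid2.map (fun row => pvRowPrefix none row)
  let R := grid2.map (fun row => pvRev (pvRowPrefix none (pvRev row)))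
  let U := pvColPrefix (List.replicate cols none) grid2
  let D := pvRev (pvColPrefix (List.replicate cols none) (pvRev grid2))
  (PySem.List.pyRange 0 rows).foldl (fun count r =>
    (PySem.List.pyRange 0 (cols : Int)).foldl (fun count c =>
      let v := pvGet2 grid2 r c  -- grid[r][c], same subscript helper as A's port
      if pvOk (PySem.List.pyGetD (PySem.List.pyGetD L r []) c none) v ||
         pvOk (PySem.List.pyGetD (PySem.List.pyGetD R r []) c none) v ||
         pvOk (PySem.List.pyGetD (PySem.List.pyGetD U r []) c none) v ||
         pvOk (PySem.List.pyGetD (PySem.List.pyGetD D r []) c none) v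
      then count + 1 else count) count) 0

-- ===== PRECONDITION & SPEC =====
-- Pre_ excludes the empty grid (A raises IndexError on grid[0]) and grids with a row shorter
-- than the first row: there A's column scans raise IndexError for most cells, and where A still
-- returns (e.g. only edge cells, so the short row is never indexed) B naturally raises.
def Pre_get_visible_count (grid : List (List Int)) : Prop :=
  grid ≠ [] ∧ ∀ row ∈ grid, (grid.headD []).length ≤ row.length
instance (grid : List (List Int)) : Decidable (Pre_get_visible_count grid) := by
  unfold Pre_get_visible_count; infer_instance
def pvWitness_get_visible_count : List (List Int) := [[1, 2], [3, 4]]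

def Spec_get_visible_count (grid : List (List Int)) (out : Int) : Prop := out = get_visible_count_alt grid
instance (grid : List (List Int)) (out : Int) : Decidable (Spec_get_visible_count grid out) := by unfold Spec_get_visible_count; infer_instance

-- ===== CLAIM (what is proved, stated in full; the proofs are below) =====
def Claim_equal_get_visible_count : Prop := ∀ (grid : List (List Int)), Dom_get_visible_count grid → Pre_get_visible_count grid → Spec_get_visible_count grid (get_visible_count grid)

-- ===== LEMMAS AND PROOFS =====

theorem pv_length_rowPrefix (m : Option Int) (xs : List Int) :
    (pvRowPrefix m xs).length = xs.length := by
  induction xs generalizing m with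
  | nil => rfl
  | cons x t ih => simp [pvRowPrefix, ih]

theorem pv_rowPrefix_getElem? (xs : List Int) (m : Option Int) (c : Nat) (h : c < xs.length) :
    (pvRowPrefix m xs)[c]? = some ((xs.take c).foldl pvStep m) := by
  induction xs generalizing m c with
  | nil => simp at h
  | cons x t ih =>
    cases c with
    | zero => simp [pvRowPrefix]
    | succ c' => simpa [pvRowPrefix] using ih (pvStep m x) c' (by simpa using h)

theorem pv_ok_step (m : Option Int) (x v : Int) :
    pvOk (pvStep m x) v = (pvOk m v && decide (x < v)) := by
  cases m <;> simp [pvStep, pvOk]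

theorem pv_ok_foldl (l : List Int) (m : Option Int) (v : Int) :
    pvOk (l.foldl pvStep m) v = (pvOk m v && l.all (fun x => decide (x < v))) := by
  induction l generalizing m with
  | nil => simp
  | cons x t ih => simp [ih, pv_ok_step, Bool.and_assoc]

theorem pv_length_colPrefix (m : List (Option Int)) (g : List (List Int)) :
    (pvColPrefix m g).length = g.length := by
  induction g generalizing m with
  | nil => rfl
  | cons row t ih => simp [pvColPrefix, ih]

theorem pv_colPrefix_getElem? (g : List (List Int)) (m : List (Option Int)) (r : Nat)
    (h : r < g.length) :
    (pvColPrefix m g)[r]? = some ((g.take r).foldl (fun acc row => List.zipWith pvStep acc row) m) := by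
  induction g generalizing m r with
  | nil => simp at h
  | cons row t ih =>
    cases r with
    | zero => simp [pvColPrefix]
    | succ r' => simpa [pvColPrefix] using ih (List.zipWith pvStep m row) r' (by simpa using h)

theorem pv_getD_zipWith (m : List (Option Int)) (row : List Int) (c : Nat)
    (h1 : c < m.length) (h2 : c < row.length) :
    (List.zipWith pvStep m row).getD c none = pvStep (m.getD c none) (row.getD c 0) := by
  simp [List.getD_eq_getElem?_getD, List.getElem?_zipWith, List.getElem?_eq_getElem h1,
    List.getElem?_eq_getElem h2]

theorem pv_zip_foldl_getD (g : List (List Int)) (m : List (Option Int)) (c : Nat)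
    (hc : c < m.length) (hrows : ∀ row ∈ g, m.length ≤ row.length) :
    (g.foldl (fun acc row => List.zipWith pvStep acc row) m).getD c none
      = ((g.map (fun row => row.getD c 0)).foldl pvStep (m.getD c none)) := by
  induction g generalizing m with
  | nil => simp
  | cons row t ih =>
    have hrow : m.length ≤ row.length := hrows row (List.mem_cons_self ..)
    have hlen : (List.zipWith pvStep m row).length = m.length := by
      simp [List.length_zipWith]; omega
    simp only [List.foldl_cons, List.map_cons]
    rw [ih (List.zipWith pvStep m row) (by omega)
        (fun q hq => by rw [hlen]; exact hrows q (List.mem_cons_of_mem _ hq)),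
      pv_getD_zipWith m row c hc (by omega)]

theorem pv_range_all_congr (k : Nat) (f g : Nat → Bool) (h : ∀ i, i < k → f i = g i) :
    (List.range k).all f = (List.range k).all g := by
  apply Bool.eq_iff_iff.mpr
  simp only [List.all_eq_true, List.mem_range]
  exact ⟨fun H i hi => (h i hi) ▸ H i hi, fun H i hi => (h i hi) ▸ H i hi⟩

theorem pv_all_take_range {α : Type} (l : List α) (p : α → Bool) (d : α) :
    ∀ r, r ≤ l.length → (l.take r).all p = (List.range r).all (fun i => p (l.getD i d)) := by
  induction l with
  | nil =>
    intro r hr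
    simp only [List.length_nil, Nat.le_zero] at hr
    subst hr; simp
  | cons x t ih =>
    intro r hr
    cases r with
    | zero => simp
    | succ r' =>
      simp only [List.take_succ_cons, List.all_cons, List.range_succ_eq_map, List.all_map]
      rw [ih r' (by simpa using hr)]
      simp [Function.comp_def]

theorem pv_all_drop_range {α : Type} (l : List α) (p : α → Bool) (d : α) (m : Nat) :
    (l.drop m).all p = (List.range (l.length - m)).all (fun i => p (l.getD (m + i) d)) := by
  have h := pv_all_take_range (l.drop m) p d (l.drop m).length le_rfl
  rw [List.take_length] at h
  rw [h, List.length_drop]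
  exact pv_range_all_congr _ _ _ (fun i _ => by
    simp [List.getD_eq_getElem?_getD, List.getElem?_drop])

theorem pv_replicate_getD (w c : Nat) :
    (List.replicate w (none : Option Int)).getD c none = none := by
  simp only [List.getD_eq_getElem?_getD, List.getElem?_replicate]
  split <;> rfl

-- ---- A's four directional scans, in canonical List.range form ----

theorem pv_A_up (g : List (List Int)) (r c : Nat) (v : Int) :
    ((PySem.List.pyRange 0 (r:Int)).all (fun i => decide (pvGet2 g i (c:Int) < v)))
    = (List.range r).all (fun i => decide ((g.getD i []).getD c 0 < v)) := by
  rw [PySem.List.pyRange_one]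
  simp [List.all_map, pvGet2, PySem.List.pyGetD_natCast, Function.comp_def]

theorem pv_A_down (g : List (List Int)) (r c : Nat) (v : Int) (hr : r < g.length) :
    ((PySem.List.pyRange ((r:Int) + 1) (g.length : Int)).all (fun i => decide (pvGet2 g i (c:Int) < v)))
    = (List.range (g.length - (r+1))).all (fun i => decide ((g.getD (r+1+i) []).getD c 0 < v)) := by
  rw [PySem.List.pyRange_one]
  have h1 : ((g.length : Int) - ((r:Int) + 1)).toNat = g.length - (r+1) := by omega
  rw [h1]
  simp only [List.all_map, Function.comp_def]
  apply List.all_congr rfl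
  intro k
  have h2 : ((r:Int) + 1 + (k:Int)) = ((r+1+k : Nat) : Int) := by push_cast; ring
  simp only [pvGet2]
  rw [h2]
  simp only [PySem.List.pyGetD_natCast]

theorem pv_A_left (g : List (List Int)) (r c : Nat) (v : Int) :
    ((PySem.List.pyRange 0 (c:Int)).all (fun j => decide (pvGet2 g (r:Int) j < v)))
    = (List.range c).all (fun j => decide ((g.getD r []).getD j 0 < v)) := by
  rw [PySem.List.pyRange_one]
  simp [List.all_map, pvGet2, PySem.List.pyGetD_natCast, Function.comp_def]

theorem pv_A_right (g : List (List Int)) (w r c : Nat) (v : Int) (hc : c < w) :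
    ((PySem.List.pyRange ((c:Int) + 1) (w : Int)).all (fun j => decide (pvGet2 g (r:Int) j < v)))
    = (List.range (w - (c+1))).all (fun j => decide ((g.getD r []).getD (c+1+j) 0 < v)) := by
  rw [PySem.List.pyRange_one]
  have h1 : ((w : Int) - ((c:Int) + 1)).toNat = w - (c+1) := by omega
  rw [h1]
  simp only [List.all_map, Function.comp_def]
  apply List.all_congr rfl
  intro k
  have h2 : ((c:Int) + 1 + (k:Int)) = ((c+1+k : Nat) : Int) := by push_cast; ring
  simp only [pvGet2]
  rw [h2]
  simp only [PySem.List.pyGetD_natCast]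

-- ---- B's four table lookups (on the row-truncated grid), in the same canonical form ----

theorem pv_takeD_getD (l : List Int) (w c : Nat) (hc : c < w) :
    (l.take w).getD c 0 = l.getD c 0 := by
  simp [List.getD_eq_getElem?_getD, hc]

theorem pv_B_U (g : List (List Int)) (w r c : Nat) (v : Int) (hr : r < g.length) (hc : c < w)
    (hge : ∀ row ∈ g, w ≤ row.length) :
    pvOk (((pvColPrefix (List.replicate w (none : Option Int)) (g.map (fun row => row.take w))).getD r []).getD c none) v
    = (List.range r).all (fun i => decide ((g.getD i []).getD c 0 < v)) := by
  rw [List.getD_eq_getElem?_getD (l := pvColPrefix (List.replicate w (none : Option Int)) (g.map (fun row => row.take w))),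
    pv_colPrefix_getElem? _ _ r (by simpa using hr), Option.getD_some,
    pv_zip_foldl_getD _ _ c (by simpa using hc)
      (fun row hrow => by
        obtain ⟨row0, hrow0, rfl⟩ := List.mem_map.mp (List.mem_of_mem_take hrow)
        simp only [List.length_replicate, List.length_take]
        exact le_min le_rfl (hge row0 hrow0)),
    pv_ok_foldl, pv_replicate_getD]
  simp only [pvOk, Bool.true_and]
  rw [← List.map_take, List.map_map, List.all_map,
    pv_all_take_range g _ [] r (le_of_lt hr)]
  exact pv_range_all_congr _ _ _ (fun i _ => by
    simp [Function.comp_def, List.getD_eq_getElem?_getD, hc])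

theorem pv_B_D (g : List (List Int)) (w r c : Nat) (v : Int) (hr : r < g.length) (hc : c < w)
    (hge : ∀ row ∈ g, w ≤ row.length) :
    pvOk ((((pvColPrefix (List.replicate w (none : Option Int)) (g.map (fun row => row.take w)).reverse).reverse).getD r []).getD c none) v
    = (List.range (g.length - (r+1))).all (fun i => decide ((g.getD (r+1+i) []).getD c 0 < v)) := by
  have hlen : (pvColPrefix (List.replicate w (none : Option Int)) (g.map (fun row => row.take w)).reverse).length = g.length := by
    rw [pv_length_colPrefix, List.length_reverse, List.length_map]
  rw [List.getD_eq_getElem?_getD (l := (pvColPrefix (List.replicate w (none : Option Int)) (g.map (fun row => row.take w)).reverse).reverse),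
    List.getElem?_reverse (by omega),
    pv_colPrefix_getElem? _ _ _ (by rw [List.length_reverse, List.length_map]; omega), Option.getD_some,
    pv_zip_foldl_getD _ _ c (by simpa using hc)
      (fun row hrow => by
        obtain ⟨row0, hrow0, rfl⟩ :=
          List.mem_map.mp (List.mem_reverse.mp (List.mem_of_mem_take hrow))
        simp only [List.length_replicate, List.length_take]
        exact le_min le_rfl (hge row0 hrow0)),
    pv_ok_foldl, pv_replicate_getD]
  simp only [pvOk, Bool.true_and]
  rw [hlen, ← List.map_reverse, ← List.map_take, List.map_map, List.all_map,
    List.take_reverse]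
  have h2 : g.length - (g.length - 1 - r) = r + 1 := by omega
  rw [h2, List.all_reverse, pv_all_drop_range g _ []]
  exact pv_range_all_congr _ _ _ (fun i _ => by
    simp [Function.comp_def, List.getD_eq_getElem?_getD, hc])

theorem pv_B_L (g : List (List Int)) (w r c : Nat) (v : Int) (hr : r < g.length) (hc : c < w)
    (hge : ∀ row ∈ g, w ≤ row.length) :
    pvOk ((((g.map (fun row => row.take w)).map (fun row => pvRowPrefix none row)).getD r []).getD c none) v
    = (List.range c).all (fun j => decide ((g.getD r []).getD j 0 < v)) := by
  rw [List.map_map,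
    List.getD_eq_getElem?_getD (l := g.map ((fun row => pvRowPrefix none row) ∘ (fun row => row.take w))),
    List.getElem?_map, List.getElem?_eq_getElem hr]
  simp only [Function.comp_def, Option.map_some, Option.getD_some]
  have hrow : w ≤ g[r].length := hge g[r] (g.getElem_mem hr)
  have hlen : (g[r].take w).length = w := by simp; omega
  rw [List.getD_eq_getElem?_getD (l := pvRowPrefix none (g[r].take w)),
    pv_rowPrefix_getElem? _ none c (by omega), Option.getD_some, pv_ok_foldl,
    List.take_take]
  have hmin : min c w = c := by omega
  simp only [pvOk, Bool.true_and, hmin]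
  rw [pv_all_take_range g[r] _ 0 c (by omega), List.getD_eq_getElem g [] hr]

theorem pv_B_R (g : List (List Int)) (w r c : Nat) (v : Int) (hr : r < g.length) (hc : c < w)
    (hge : ∀ row ∈ g, w ≤ row.length) :
    pvOk ((((g.map (fun row => row.take w)).map (fun row => (pvRowPrefix none row.reverse).reverse)).getD r []).getD c none) v
    = (List.range (w - (c+1))).all (fun j => decide ((g.getD r []).getD (c+1+j) 0 < v)) := by
  rw [List.map_map,
    List.getD_eq_getElem?_getD (l := g.map ((fun row => (pvRowPrefix none row.reverse).reverse) ∘ (fun row => row.take w))),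
    List.getElem?_map, List.getElem?_eq_getElem hr]
  simp only [Function.comp_def, Option.map_some, Option.getD_some]
  have hrow : w ≤ g[r].length := hge g[r] (g.getElem_mem hr)
  have htlen : (g[r].take w).length = w := by simp; omega
  have hlen : (pvRowPrefix none (g[r].take w).reverse).length = w := by
    rw [pv_length_rowPrefix, List.length_reverse, htlen]
  rw [List.getD_eq_getElem?_getD (l := (pvRowPrefix none (g[r].take w).reverse).reverse),
    List.getElem?_reverse (by omega),
    pv_rowPrefix_getElem? _ none _ (by rw [List.length_reverse, htlen]; omega), Option.getD_some,
    pv_ok_foldl]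
  simp only [pvOk, Bool.true_and]
  rw [hlen, List.take_reverse, htlen]
  have h2 : w - (w - 1 - c) = c + 1 := by omega
  rw [h2, List.all_reverse, pv_all_drop_range (g[r].take w) _ 0, htlen]
  refine (pv_range_all_congr _ _ _ (fun j hj => by
    rw [pv_takeD_getD g[r] w (c+1+j) (by omega)])).trans ?_
  rw [List.getD_eq_getElem g [] hr]

-- ---- per-cell equality and edge handling ----

-- A's if-chain per cell, collapsed to a single test
theorem pv_ite_collapse (e v : Bool) (a : Int) :
    (if e then a + 1 else if v then a + 1 else a) = (if (e || v) then a + 1 else a) := by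
  cases e <;> simp

-- on an edge cell one of the four canonical scans is over an empty range
theorem pv_edge_true (g : List (List Int)) (w r c : Nat) (v : Int)
    (he : ((r:Int) == 0 || (r:Int) == (g.length:Int) - 1 || (c:Int) == 0 || (c:Int) == (w:Int) - 1) = true) :
    ((List.range r).all (fun i => decide ((g.getD i []).getD c 0 < v)) ||
     (List.range (g.length - (r+1))).all (fun i => decide ((g.getD (r+1+i) []).getD c 0 < v)) ||
     (List.range c).all (fun j => decide ((g.getD r []).getD j 0 < v)) ||
     (List.range (w - (c+1))).all (fun j => decide ((g.getD r []).getD (c+1+j) 0 < v))) = true := by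
  simp only [Bool.or_eq_true] at he
  refine he.elim (fun he2 => he2.elim (fun he3 => he3.elim (fun h => ?_) (fun h => ?_)) (fun h => ?_)) (fun h => ?_) <;>
    replace h := eq_of_beq h
  · have h0 : r = 0 := by omega
    rw [h0]; simp
  · have h0 : g.length - (r + 1) = 0 := by omega
    rw [h0]; simp
  · have h0 : c = 0 := by omega
    rw [h0]; simp
  · have h0 : w - (c + 1) = 0 := by omega
    rw [h0]; simp

theorem pv_get2_trunc (g : List (List Int)) (w r c : Nat) (hr : r < g.length) (hc : c < w) :
    pvGet2 (g.map (fun row => row.take w)) (r:Int) (c:Int) = pvGet2 g (r:Int) (c:Int) := by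
  simp only [pvGet2, PySem.List.pyGetD_natCast]
  rw [List.getD_eq_getElem?_getD (l := g.map (fun row => row.take w)),
    List.getElem?_map, List.getElem?_eq_getElem hr]
  simp only [Option.map_some, Option.getD_some]
  rw [pv_takeD_getD _ w c hc, List.getD_eq_getElem g [] hr]

-- ===== VERDICT (by name: the statement is the Claim_ definition above) =====
theorem get_visible_count_spec : Claim_equal_get_visible_count := by
  intro g _ hpre
  obtain ⟨hne, hge⟩ := hpre
  unfold Spec_get_visible_count
  have hg0 : PySem.List.pyGetD g 0 [] = g.headD [] := by
    cases g with
    | nil => exact absurd rfl hne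
    | cons h t => simp [PySem.List.pyGetD_ofNat']
  have hsl : ∀ row : List Int, PySem.List.slice row none (some (((g.headD []).length : Nat) : Int))
      = row.take (g.headD []).length := by
    intro row
    rw [PySem.List.slice_to row (by positivity)]
    simp
  simp only [get_visible_count, get_visible_count_alt, hg0, hsl, pvRev,
    PySem.List.slice?_none_none_neg_one, Option.getD_some]
  apply PySem.List.foldl_congr_mem
  intro acc x hx
  rw [PySem.List.mem_pyRange_one] at hx
  obtain ⟨hx0, hxn⟩ := hx
  obtain ⟨r, rfl⟩ : ∃ r : Nat, x = (r : Int) := ⟨x.toNat, by omega⟩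
  have hr : r < g.length := by exact_mod_cast hxn
  apply PySem.List.foldl_congr_mem
  intro acc2 y hy
  rw [PySem.List.mem_pyRange_one] at hy
  obtain ⟨hy0, hyw⟩ := hy
  obtain ⟨c, rfl⟩ : ∃ c : Nat, y = (c : Int) := ⟨y.toNat, by omega⟩
  have hc : c < (g.headD []).length := by exact_mod_cast hyw
  rw [pv_ite_collapse]
  simp only [PySem.List.pyGetD_natCast]
  rw [pv_get2_trunc g _ r c hr hc]
  have hA : pvIsVisible g (g.length : Int) ((g.headD []).length : Int) (r : Int) (c : Int)
      = ((List.range r).all (fun i => decide ((g.getD i []).getD c 0 < pvGet2 g (r:Int) (c:Int))) ||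
         (List.range (g.length - (r+1))).all (fun i => decide ((g.getD (r+1+i) []).getD c 0 < pvGet2 g (r:Int) (c:Int))) ||
         (List.range c).all (fun j => decide ((g.getD r []).getD j 0 < pvGet2 g (r:Int) (c:Int))) ||
         (List.range ((g.headD []).length - (c+1))).all (fun j => decide ((g.getD r []).getD (c+1+j) 0 < pvGet2 g (r:Int) (c:Int)))) := by
    simp only [pvIsVisible]
    rw [pv_A_up, pv_A_down g r c _ hr, pv_A_left, pv_A_right g _ r c _ hc]
  have hB : (pvOk ((((g.map (fun row => row.take (g.headD []).length)).map (fun row => pvRowPrefix none row)).getD r []).getD c none) (pvGet2 g (r:Int) (c:Int)) ||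
      pvOk ((((g.map (fun row => row.take (g.headD []).length)).map (fun row => (pvRowPrefix none row.reverse).reverse)).getD r []).getD c none) (pvGet2 g (r:Int) (c:Int)) ||
      pvOk (((pvColPrefix (List.replicate (g.headD []).length (none : Option Int)) (g.map (fun row => row.take (g.headD []).length))).getD r []).getD c none) (pvGet2 g (r:Int) (c:Int)) ||
      pvOk ((((pvColPrefix (List.replicate (g.headD []).length (none : Option Int)) (g.map (fun row => row.take (g.headD []).length)).reverse).reverse).getD r []).getD c none) (pvGet2 g (r:Int) (c:Int)))
      = ((List.range r).all (fun i => decide ((g.getD i []).getD c 0 < pvGet2 g (r:Int) (c:Int))) ||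
         (List.range (g.length - (r+1))).all (fun i => decide ((g.getD (r+1+i) []).getD c 0 < pvGet2 g (r:Int) (c:Int))) ||
         (List.range c).all (fun j => decide ((g.getD r []).getD j 0 < pvGet2 g (r:Int) (c:Int))) ||
         (List.range ((g.headD []).length - (c+1))).all (fun j => decide ((g.getD r []).getD (c+1+j) 0 < pvGet2 g (r:Int) (c:Int)))) := by
    rw [pv_B_L g _ r c _ hr hc hge, pv_B_R g _ r c _ hr hc hge,
      pv_B_U g _ r c _ hr hc hge, pv_B_D g _ r c _ hr hc hge]
    cases ((List.range r).all (fun i => decide ((g.getD i []).getD c 0 < pvGet2 g (r:Int) (c:Int)))) <;>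
      cases ((List.range (g.length - (r+1))).all (fun i => decide ((g.getD (r+1+i) []).getD c 0 < pvGet2 g (r:Int) (c:Int)))) <;>
      cases ((List.range c).all (fun j => decide ((g.getD r []).getD j 0 < pvGet2 g (r:Int) (c:Int)))) <;>
      cases ((List.range ((g.headD []).length - (c+1))).all (fun j => decide ((g.getD r []).getD (c+1+j) 0 < pvGet2 g (r:Int) (c:Int)))) <;>
      simp
  rw [hA, hB]
  cases he : ((r:Int) == 0 || (r:Int) == (g.length:Int) - 1 || (c:Int) == 0 || (c:Int) == ((g.headD []).length:Int) - 1) with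
  | false => rw [Bool.false_or]
  | true =>
    rw [Bool.true_or, pv_edge_true g _ r c _ he]
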